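-- pv_equiv track=rewrite | github.com/tjthejuggler/tail | wallpaper_color_manager/wallpaper_color_manager.py | map_rgb_to_category
-- ===== SOURCE A (Python) =====
-- COLOR_RANGES = {
--     "red": [(150, 0, 0), (255, 100, 100)],
--     "orange": [(150, 75, 0), (255, 200, 100)],
--     "green": [(0, 150, 0), (100, 255, 100)],
--     "blue": [(0, 0, 150), (100, 100, 255)],
--     "pink": [(150, 0, 150), (255, 100, 255)],
--     "yellow": [(150, 150, 0), (255, 255, 100)],
--     "white_gray_black": [(0, 0, 0), (255, 255, 255)]  # This is a catch-all
-- }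
--
-- def map_rgb_to_category(rgb):
--     """
--     Map an RGB color to one of our predefined categories.
--
--     Args:
--         rgb: Numpy array of RGB values
--
--     Returns:
--         String representing the color category
--     """
--     # Calculate distance to each color range
--     min_distances = {}
--
--     for category, ranges in COLOR_RANGES.items():
--         min_range, max_range = ranges
--
--         # Check if color is within range
--         if all(min_range[i] <= rgb[i] <= max_range[i] for i in range(3)):
--             return category
--
--         # Calculate minimum distance to range
--         min_dist = 0
--         for i in range(3):
--             if rgb[i] < min_range[i]:
--                 min_dist += (min_range[i] - rgb[i]) ** 2
--             elif rgb[i] > max_range[i]: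
--                 min_dist += (rgb[i] - max_range[i]) ** 2
--
--         min_distances[category] = min_dist
--
--     # Return category with minimum distance
--     return min(min_distances.items(), key=lambda x: x[1])[0]
-- ===== SOURCE B (Python) =====
-- # Table-driven reformulation: a 3x4 memo of per-channel distances to the four
-- # distinct channel intervals, with each category reduced to a triple of indices
-- # into that table; min() with a key picks the earliest minimal category.
--
-- _INTERVALS = [(0, 255), (0, 100), (150, 255), (75, 200)]
--
-- _CATS = [
--     ("red", (2, 1, 1)),
--     ("orange", (2, 3, 1)),
--     ("green", (1, 2, 1)),
--     ("blue", (1, 1, 2)),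
--     ("pink", (2, 1, 2)),
--     ("yellow", (2, 2, 1)),
--     ("white_gray_black", (0, 0, 0)),
-- ]
--
--
-- def map_rgb_to_category(rgb):
--     tab = [
--         [(l - v) ** 2 if v < l else (v - h) ** 2 if v > h else 0
--          for (l, h) in _INTERVALS]
--         for v in rgb
--     ]
--     return min(_CATS, key=lambda c: tab[0][c[1][0]] + tab[1][c[1][1]] + tab[2][c[1][2]])[0]
-- ===== Notes on version B (the rewrite author's own statement) =====
-- stated objective: alternative
-- what changed: B drops A's per-category containment check, 3-component distance loop, dict and final min(): it precomputes a 3x4 table of per-channel distances to the four distinct channel intervals, represents each category as a triple of indices into that table, and picks the category with the minimal index-triple sum via min() with a key (first minimum wins ties, reproducing A's precedence and the white_gray_black catch-all).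
import Mathlib
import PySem

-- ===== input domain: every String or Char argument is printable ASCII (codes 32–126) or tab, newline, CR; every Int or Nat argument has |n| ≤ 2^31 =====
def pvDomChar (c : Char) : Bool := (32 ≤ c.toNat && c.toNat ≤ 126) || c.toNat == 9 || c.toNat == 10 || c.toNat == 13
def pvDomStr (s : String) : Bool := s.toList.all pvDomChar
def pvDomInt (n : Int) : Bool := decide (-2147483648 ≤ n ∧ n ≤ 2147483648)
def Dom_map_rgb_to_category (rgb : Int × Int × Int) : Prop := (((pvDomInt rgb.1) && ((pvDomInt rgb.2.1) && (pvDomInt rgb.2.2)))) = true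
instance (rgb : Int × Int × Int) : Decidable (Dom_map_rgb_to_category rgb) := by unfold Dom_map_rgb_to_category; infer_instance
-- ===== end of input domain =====

-- B replaces A's per-category loops (containment check + distance loop + dict + min())
-- by a 3x4 per-channel distance table indexed by category interval-index triples (objective: alternative).

-- ===== PORT A =====
-- COLOR_RANGES, in insertion order
def pvColorRanges : List (String × ((Int × Int × Int) × (Int × Int × Int))) :=
  [("red", ((150, 0, 0), (255, 100, 100))),
   ("orange", ((150, 75, 0), (255, 200, 100))),
   ("green", ((0, 150, 0), (100, 255, 100))),
   ("blue", ((0, 0, 150), (100, 100, 255))),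
   ("pink", ((150, 0, 150), (255, 100, 255))),
   ("yellow", ((150, 150, 0), (255, 255, 100))),
   ("white_gray_black", ((0, 0, 0), (255, 255, 255)))]

-- rgb[i] / min_range[i] / max_range[i] on a 3-tuple
def pvGet3 (t : Int × Int × Int) (i : Nat) : Int :=
  match i with | 0 => t.1 | 1 => t.2.1 | _ => t.2.2

-- all(min_range[i] <= rgb[i] <= max_range[i] for i in range(3))
def pvInRangeA (rgb lo hi : Int × Int × Int) : Bool :=
  (List.range 3).all (fun i => decide (pvGet3 lo i ≤ pvGet3 rgb i) && decide (pvGet3 rgb i ≤ pvGet3 hi i))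

-- the 'min_dist' accumulation loop over range(3)
def pvMinDistA (rgb lo hi : Int × Int × Int) : Int :=
  (List.range 3).foldl (fun acc i =>
    if pvGet3 rgb i < pvGet3 lo i then acc + (pvGet3 lo i - pvGet3 rgb i) ^ 2
    else if pvGet3 rgb i > pvGet3 hi i then acc + (pvGet3 rgb i - pvGet3 hi i) ^ 2
    else acc) 0

-- the main 'for category, ranges in COLOR_RANGES.items()' loop with its early return,
-- then min(min_distances.items(), key=lambda x: x[1])[0]; min on an empty dict would
-- raise in Python, but the loop always fills the dict (COLOR_RANGES is nonempty), so
-- the "" branch is unreachable on the actual call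
def pvLoopA (rgb : Int × Int × Int) :
    List (String × ((Int × Int × Int) × (Int × Int × Int))) → PySem.Dict String Int → String
  | [], d =>
      match PySem.List.min? d.items (fun x => x.2) with
      | some p => p.1
      | none => ""
  | (cat, (lo, hi)) :: rest, d =>
      if pvInRangeA rgb lo hi then cat
      else pvLoopA rgb rest (d.insert cat (pvMinDistA rgb lo hi))

def map_rgb_to_category (rgb : Int × Int × Int) : String :=
  pvLoopA rgb pvColorRanges PySem.Dict.empty

-- ===== PORT B =====
-- _INTERVALS: the four distinct per-channel intervals
def pvIntervals : List (Int × Int) :=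
  [(0, 255), (0, 100), (150, 255), (75, 200)]

-- _CATS: each category as a triple of interval indices (R, G, B channel)
def pvCats : List (String × (Nat × Nat × Nat)) :=
  [("red", (2, 1, 1)),
   ("orange", (2, 3, 1)),
   ("green", (1, 2, 1)),
   ("blue", (1, 1, 2)),
   ("pink", (2, 1, 2)),
   ("yellow", (2, 2, 1)),
   ("white_gray_black", (0, 0, 0))]

-- '(l - v) ** 2 if v < l else (v - h) ** 2 if v > h else 0'
def pvChanDist (v : Int) (p : Int × Int) : Int :=
  if v < p.1 then (p.1 - v) ^ 2 else if v > p.2 then (v - p.2) ^ 2 else 0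

-- 'tab = [[... for (l, h) in _INTERVALS] for v in rgb]'
def pvTab (rgb : Int × Int × Int) : List (List Int) :=
  [rgb.1, rgb.2.1, rgb.2.2].map (fun v => pvIntervals.map (pvChanDist v))

-- 'tab[0][c[1][0]] + tab[1][c[1][1]] + tab[2][c[1][2]]' (all indices in range by construction)
def pvKeyB (rgb : Int × Int × Int) (c : Nat × Nat × Nat) : Int :=
  ((pvTab rgb).getD 0 []).getD c.1 0 + ((pvTab rgb).getD 1 []).getD c.2.1 0
    + ((pvTab rgb).getD 2 []).getD c.2.2 0

-- 'min(_CATS, key=...)[0]'; _CATS is nonempty so Python's min never raises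
def map_rgb_to_category_alt (rgb : Int × Int × Int) : String :=
  match PySem.List.min? pvCats (fun c => pvKeyB rgb c.2) with
  | some p => p.1
  | none => ""

-- ===== PRECONDITION & SPEC =====
def Spec_map_rgb_to_category (rgb : Int × Int × Int) (out : String) : Prop := out = map_rgb_to_category_alt rgb
instance (rgb : Int × Int × Int) (out : String) : Decidable (Spec_map_rgb_to_category rgb out) := by unfold Spec_map_rgb_to_category; infer_instance

-- ===== CLAIM (what is proved, stated in full; the proofs are below) =====
def Claim_equal_map_rgb_to_category : Prop := ∀ (rgb : Int × Int × Int), Dom_map_rgb_to_category rgb → Spec_map_rgb_to_category rgb (map_rgb_to_category rgb)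

-- ===== LEMMAS AND PROOFS =====

-- per-component clamped distance (proof-side characterisation)
def pvCDist (c l h : Int) : Int :=
  if c < l then (l - c) ^ 2 else if h < c then (c - h) ^ 2 else 0

lemma pvCDist_nonneg (c l h : Int) : 0 ≤ pvCDist c l h := by
  unfold pvCDist; split_ifs <;> positivity

lemma pvCDist_eq_zero_iff (c l h : Int) : pvCDist c l h = 0 ↔ (l ≤ c ∧ c ≤ h) := by
  unfold pvCDist; split_ifs with h1 h2 <;> constructor <;> intro hx
  · nlinarith
  · omega
  · nlinarith
  · omega
  · omega
  · rfl

-- the triple distance both programs compute, per category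
def pvDist3 (rgb lo hi : Int × Int × Int) : Int :=
  pvCDist rgb.1 lo.1 hi.1 + pvCDist rgb.2.1 lo.2.1 hi.2.1 + pvCDist rgb.2.2 lo.2.2 hi.2.2

lemma pvMinDistA_eq (rgb lo hi : Int × Int × Int) :
    pvMinDistA rgb lo hi = pvDist3 rgb lo hi := by
  simp only [pvMinDistA, pvDist3, pvGet3, pvCDist, List.range, List.range.loop, List.foldl]
  split_ifs <;> ring

lemma pvDist3_nonneg (rgb lo hi : Int × Int × Int) : 0 ≤ pvDist3 rgb lo hi := by
  unfold pvDist3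
  have := pvCDist_nonneg rgb.1 lo.1 hi.1
  have := pvCDist_nonneg rgb.2.1 lo.2.1 hi.2.1
  have := pvCDist_nonneg rgb.2.2 lo.2.2 hi.2.2
  omega

lemma pvInRangeA_iff (rgb lo hi : Int × Int × Int) :
    pvInRangeA rgb lo hi = true ↔ pvDist3 rgb lo hi = 0 := by
  unfold pvDist3
  have h1 := pvCDist_nonneg rgb.1 lo.1 hi.1
  have h2 := pvCDist_nonneg rgb.2.1 lo.2.1 hi.2.1
  have h3 := pvCDist_nonneg rgb.2.2 lo.2.2 hi.2.2
  have e1 := pvCDist_eq_zero_iff rgb.1 lo.1 hi.1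
  have e2 := pvCDist_eq_zero_iff rgb.2.1 lo.2.1 hi.2.1
  have e3 := pvCDist_eq_zero_iff rgb.2.2 lo.2.2 hi.2.2
  simp only [pvInRangeA, pvGet3, List.range, List.range.loop, List.all_cons, List.all_nil,
    Bool.and_true, Bool.and_eq_true, decide_eq_true_eq]
  constructor
  · rintro ⟨⟨a1, b1⟩, ⟨a2, b2⟩, a3, b3⟩
    have := e1.mpr ⟨a1, b1⟩; have := e2.mpr ⟨a2, b2⟩; have := e3.mpr ⟨a3, b3⟩; omega
  · intro hz
    have z1 : pvCDist rgb.1 lo.1 hi.1 = 0 := by omega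
    have z2 : pvCDist rgb.2.1 lo.2.1 hi.2.1 = 0 := by omega
    have z3 : pvCDist rgb.2.2 lo.2.2 hi.2.2 = 0 := by omega
    exact ⟨⟨(e1.mp z1).1, (e1.mp z1).2⟩, ⟨(e2.mp z2).1, (e2.mp z2).2⟩, (e3.mp z3).1, (e3.mp z3).2⟩

-- the step of Python's min(..., key) as a fold
def pvStepK {α : Type} (key : α → Int) (acc : Option α) (x : α) : Option α :=
  match acc with
  | none => some x
  | some m => if key x < key m then some x else some m

lemma min?_eq_foldl_pvStepK {α : Type} (xs : List α) (key : α → Int) :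
    PySem.List.min? xs key = xs.foldl (pvStepK key) none := by
  unfold PySem.List.min? pvStepK
  rfl

-- a some-accumulator whose key no later element strictly beats is final
lemma foldl_pvStepK_fixed (post : List (String × Int)) (m : String × Int)
    (h : ∀ p ∈ post, ¬ p.2 < m.2) :
    post.foldl (pvStepK (fun x => x.2)) (some m) = some m := by
  induction post with
  | nil => rfl
  | cons x t ih =>
      have hx : ¬ x.2 < m.2 := h x (List.mem_cons_self)
      simp only [List.foldl, pvStepK, if_neg hx]
      exact ih (fun p hp => h p (List.mem_cons_of_mem _ hp))

-- the distance list of the remaining categories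
def pvDists (rgb : Int × Int × Int)
    (l : List (String × ((Int × Int × Int) × (Int × Int × Int)))) : List (String × Int) :=
  l.map (fun e => (e.1, pvDist3 rgb e.2.1 e.2.2))

def pvOut (o : Option (String × Int)) : String :=
  match o with | some p => p.1 | none => ""

-- main invariant: A's loop returns the first minimal entry of (seen dict ++ remaining dists)
lemma pvLoopA_eq (rgb : Int × Int × Int) :
    ∀ (l : List (String × ((Int × Int × Int) × (Int × Int × Int))))
      (d : PySem.Dict String Int),
      d.keys.Nodup →
      (∀ e ∈ l, d.contains e.1 = false) →
      (l.map Prod.fst).Nodup →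
      (∀ p ∈ d.items, 0 < p.2) →
      pvLoopA rgb l d = pvOut (PySem.List.min? (d.items ++ pvDists rgb l) (fun x => x.2)) := by
  intro l
  induction l with
  | nil => intro d _ _ _ _; simp [pvLoopA, pvDists, pvOut]
  | cons e rest ih =>
      intro d hnd hfresh hlnd hpos
      obtain ⟨cat, lo, hi⟩ := e
      by_cases hin : pvInRangeA rgb lo hi = true
      · -- A returns cat; the distance of cat is 0, earlier entries are > 0, later ≥ 0
        have hz : pvDist3 rgb lo hi = 0 := (pvInRangeA_iff rgb lo hi).mp hin
        simp only [pvLoopA, if_pos hin]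
        rw [min?_eq_foldl_pvStepK]
        have hsplit : d.items ++ pvDists rgb ((cat, (lo, hi)) :: rest)
            = d.items ++ ((cat, pvDist3 rgb lo hi) :: pvDists rgb rest) := rfl
        rw [hsplit, List.foldl_append]
        -- after d.items the accumulator is none or some m with 0 < m.2
        have hmin : d.items.foldl (pvStepK (fun x => x.2)) none = none ∨
            ∃ m, d.items.foldl (pvStepK (fun x => x.2)) none = some m ∧ 0 < m.2 := by
          rcases h : d.items.foldl (pvStepK (fun x => x.2)) none with _ | m
          · exact Or.inl h
          · refine Or.inr ⟨m, h, ?_⟩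
            have hm : m ∈ d.items := by
              have := PySem.List.min?_mem (xs := d.items) (key := fun x => x.2)
                (m := m) (by rw [min?_eq_foldl_pvStepK, h])
              exact this
            exact hpos m hm
        have hafter :
            ((cat, pvDist3 rgb lo hi) :: pvDists rgb rest).foldl (pvStepK (fun x => x.2))
              (d.items.foldl (pvStepK (fun x => x.2)) none) = some (cat, pvDist3 rgb lo hi) := by
          rcases hmin with h0 | ⟨m, hm, hmpos⟩
          · rw [h0]
            simp only [List.foldl, pvStepK]
            apply foldl_pvStepK_fixed
            intro p hp
            simp only [pvDists, List.mem_map] at hp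
            obtain ⟨a, _, rfl⟩ := hp
            have := pvDist3_nonneg rgb a.2.1 a.2.2
            simp only [hz]; omega
          · rw [hm]
            have hlt : pvDist3 rgb lo hi < m.2 := by omega
            simp only [List.foldl, pvStepK, if_pos hlt]
            apply foldl_pvStepK_fixed
            intro p hp
            simp only [pvDists, List.mem_map] at hp
            obtain ⟨a, _, rfl⟩ := hp
            have := pvDist3_nonneg rgb a.2.1 a.2.2
            simp only [hz]; omega
        rw [hafter]
        rfl
      · -- A inserts (cat, δ) with δ > 0 and recurses; insert appends since cat is fresh
        have hδpos : 0 < pvDist3 rgb lo hi := by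
          have hnz : pvDist3 rgb lo hi ≠ 0 := fun h => hin ((pvInRangeA_iff rgb lo hi).mpr h)
          have := pvDist3_nonneg rgb lo hi
          omega
        have hcfresh : d.contains cat = false := hfresh _ (List.mem_cons_self)
        simp only [pvLoopA, if_neg hin]
        rw [pvMinDistA_eq]
        have hitems : (d.insert cat (pvDist3 rgb lo hi)).items
            = d.items ++ [(cat, pvDist3 rgb lo hi)] :=
          PySem.Dict.items_insert_of_not_contains _ _ hcfresh
        have hrec := ih (d.insert cat (pvDist3 rgb lo hi))
          (PySem.Dict.nodup_keys_insert _ _ _ hnd)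
          (by
            intro e' he'
            have hne : e'.1 ≠ cat := by
              have := hlnd
              simp only [List.map_cons, List.nodup_cons, List.mem_map] at this
              intro hq
              exact this.1 ⟨e', he', hq⟩
            rw [PySem.Dict.contains_insert]
            simp only [beq_eq_false_iff_ne, Bool.or_eq_false_iff]
            exact ⟨by simpa using hne, hfresh e' (List.mem_cons_of_mem _ he')⟩)
          (by
            have := hlnd
            simp only [List.map_cons, List.nodup_cons] at this
            exact this.2)
          (by
            intro p hp
            rw [hitems] at hp
            rcases List.mem_append.mp hp with h1 | h2
            · exact hpos p h1
            · simp only [List.mem_singleton] at h2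
              subst h2
              exact hδpos)
        rw [hrec, hitems, List.append_assoc]
        rfl

-- mapping a category/index entry to its (name, key) pair
def pvToPair (rgb : Int × Int × Int) (c : String × (Nat × Nat × Nat)) : String × Int :=
  (c.1, pvKeyB rgb c.2)

-- one step of the keyed min commutes with pvToPair
lemma pvStepK_comm (rgb : Int × Int × Int) (acc : Option (String × (Nat × Nat × Nat)))
    (x : String × (Nat × Nat × Nat)) :
    pvStepK (fun y : String × Int => y.2) (acc.map (pvToPair rgb)) (pvToPair rgb x)
      = (pvStepK (fun c => pvKeyB rgb c.2) acc x).map (pvToPair rgb) := by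
  cases acc with
  | none => rfl
  | some m =>
      simp only [Option.map, pvStepK, pvToPair]
      split_ifs <;> rfl

-- the whole keyed-min fold commutes with pvToPair
lemma foldl_pvStepK_map (rgb : Int × Int × Int) :
    ∀ (xs : List (String × (Nat × Nat × Nat))) (acc : Option (String × (Nat × Nat × Nat))),
      (xs.map (pvToPair rgb)).foldl (pvStepK (fun y : String × Int => y.2))
          (acc.map (pvToPair rgb))
        = (xs.foldl (pvStepK (fun c => pvKeyB rgb c.2)) acc).map (pvToPair rgb) := by
  intro xs
  induction xs with
  | nil => intro acc; rfl
  | cons x t ih =>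
      intro acc
      simp only [List.map_cons, List.foldl]
      rw [pvStepK_comm, ih]

-- B's min? over the category/index list names the same element as min? over the distance
-- list: each table-lookup key is (definitionally) the triple distance of the matching box
lemma altB_eq (rgb : Int × Int × Int) :
    map_rgb_to_category_alt rgb
      = pvOut (PySem.List.min? (pvDists rgb pvColorRanges) (fun x => x.2)) := by
  have hlist : pvDists rgb pvColorRanges = pvCats.map (pvToPair rgb) := rfl
  unfold map_rgb_to_category_alt
  rw [min?_eq_foldl_pvStepK, min?_eq_foldl_pvStepK, hlist]
  rw [show (none : Option (String × Int)) = Option.map (pvToPair rgb) none from rfl]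
  rw [foldl_pvStepK_map]
  cases hres : pvCats.foldl (pvStepK (fun c => pvKeyB rgb c.2)) none <;>
    simp only [Option.map, pvOut, pvToPair]

-- ===== VERDICT (by name: the statement is the Claim_ definition above) =====
theorem map_rgb_to_category_spec : Claim_equal_map_rgb_to_category := by
  intro rgb _
  unfold Spec_map_rgb_to_category map_rgb_to_category
  rw [altB_eq]
  rw [pvLoopA_eq rgb pvColorRanges PySem.Dict.empty
    (by decide) (by intro e _; rfl) (by decide) (by intro p hp; exact absurd hp (List.not_mem_nil))]
  rfl
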